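-- pv_equiv track=rewrite | github.com/ilrexho2011/Project-EULER-Possible-Solutions-Problems-701_to_800 | Exercise 763/Exercise 763.py | get_uv_vectors
-- ===== SOURCE A (Python) =====
-- def get_uv_vectors(seq, use_symmetry=True):
--     """ Convert the void counts sequence into one or more pairs of u/v
--         pairs, as per the Eriksson paper.  In the vectors, 1 means this
--         edge is labeled, 0 means no label.  Also returns a multiplier to
--         use after summing the instance counts over u/v pairs, to account
--         for the symmetries we'll use. """
--     res = [([1], [1])]
--     mult = 3
--     for i in range(len(seq)-1):
--         delta = seq[i+1]-seq[i]
--         if delta < 0: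
--             for j in range(len(res)):
--                 u, v = res[j]
--                 u.append(0)
--                 v.append(0)
--         elif delta > 0:
--             for j in range(len(res)):
--                 u, v = res[j]
--                 u.append(1)
--                 v.append(1)
--         elif use_symmetry and mult == 3:
--             assert len(res) == 1
--             mult = 6
--             u, v = res[0]
--             u.append(0)
--             v.append(1)
--         else:
--             assert mult == 6 or not use_symmetry
--             for j in range(len(res)):
--                 u, v = res[j]
--                 u1 = u.copy()
--                 v1 = v.copy()
--                 u.append(0)
--                 v.append(1)
--                 u1.append(1)
--                 v1.append(0)
--                 res.append((u1, v1))
--     for u, v in res: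
--         u.append(0)
--         v.append(0)
--     return res, mult
-- ===== SOURCE B (Python) =====
-- def get_uv_vectors(seq, use_symmetry=True):
--     """Two-pass re-implementation: first classify each delta as a fixed
--     token or a branch point, then build each (u, v) pair from scratch
--     by bit index (earliest branch = least-significant bit)."""
--     tokens = []          # (a, b) fixed token, or None for a branch point
--     mult = 3
--     k = 0                # number of branch points
--     for i in range(len(seq) - 1):
--         d = seq[i + 1] - seq[i]
--         if d < 0:
--             tokens.append((0, 0))
--         elif d > 0:
--             tokens.append((1, 1))
--         elif use_symmetry and mult == 3:
--             mult = 6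
--             tokens.append((0, 1))
--         else:
--             tokens.append(None)
--             k += 1
--     res = []
--     for n in range(2 ** k):
--         u, v = [1], [1]
--         m = 0
--         for t in tokens:
--             if t is None:
--                 if (n >> m) & 1:
--                     u.append(1); v.append(0)
--                 else:
--                     u.append(0); v.append(1)
--                 m += 1
--             else:
--                 u.append(t[0]); v.append(t[1])
--         u.append(0); v.append(0)
--         res.append((u, v))
--     return res, mult
-- ===== Notes on version B (the rewrite author's own statement) =====
-- stated objective: alternative
-- what changed: Replaces the in-place copy-and-double mutation of the growing result list with a two-pass scheme: first classify every delta into a fixed token or a branch point, then construct each (u,v) pair independently from its combination index by reading its bits (earliest branch = least-significant bit).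
import Mathlib
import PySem

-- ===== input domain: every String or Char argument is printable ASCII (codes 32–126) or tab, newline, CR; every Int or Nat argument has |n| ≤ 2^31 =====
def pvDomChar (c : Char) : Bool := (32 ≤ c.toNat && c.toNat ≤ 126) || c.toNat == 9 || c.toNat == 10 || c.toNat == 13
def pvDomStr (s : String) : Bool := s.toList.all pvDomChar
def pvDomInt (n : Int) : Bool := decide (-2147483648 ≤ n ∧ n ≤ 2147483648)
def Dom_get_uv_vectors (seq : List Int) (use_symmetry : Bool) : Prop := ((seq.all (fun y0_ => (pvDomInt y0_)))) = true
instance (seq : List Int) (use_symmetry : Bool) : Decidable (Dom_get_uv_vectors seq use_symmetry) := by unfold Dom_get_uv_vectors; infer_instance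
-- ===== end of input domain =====

-- B builds each (u,v) pair independently from its combination index (two passes) instead of
-- A's in-place copy-and-double growth of the result list; same cost, different structure.

-- ===== PORT A =====
-- one iteration of A's main loop: state = (res, mult)
def pvAstep (seq : List Int) (us : Bool) :
    (List (List Int × List Int) × Int) → Nat → (List (List Int × List Int) × Int)
  | (res, mult), i =>
    let delta := seq.getD (i+1) 0 - seq.getD i 0
    if delta < 0 then (res.map (fun p => (p.1 ++ [0], p.2 ++ [0])), mult)
    else if delta > 0 then (res.map (fun p => (p.1 ++ [1], p.2 ++ [1])), mult)
    else if us && mult == 3 then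
      -- Python mutates res[0] only (it asserts len(res) == 1 there)
      (match res with
       | [] => []
       | p :: rest => (p.1 ++ [0], p.2 ++ [1]) :: rest, 6)
    else
      -- each res[j] gets (0,1) appended in place; a copy with (1,0) is appended at the end
      (res.map (fun p => (p.1 ++ [0], p.2 ++ [1])) ++ res.map (fun p => (p.1 ++ [1], p.2 ++ [0])), mult)

def get_uv_vectors (seq : List Int) (use_symmetry : Bool) : (List (List Int × List Int)) × Int :=
  (((List.range (seq.length - 1)).foldl (pvAstep seq use_symmetry) ([([1], [1])], 3)).1.map
      (fun p => (p.1 ++ [0], p.2 ++ [0])),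
   ((List.range (seq.length - 1)).foldl (pvAstep seq use_symmetry) ([([1], [1])], 3)).2)

-- ===== PORT B =====
-- first pass: classify delta i as a fixed token (some (a,b)) or a branch point (none);
-- state = (tokens, mult, k)
def pvTokStep (seq : List Int) (us : Bool) :
    (List (Option (Int × Int)) × Int × Nat) → Nat → (List (Option (Int × Int)) × Int × Nat)
  | (toks, mult, k), i =>
    let d := seq.getD (i+1) 0 - seq.getD i 0
    if d < 0 then (toks ++ [some (0, 0)], mult, k)
    else if d > 0 then (toks ++ [some (1, 1)], mult, k)
    else if us && mult == 3 then (toks ++ [some (0, 1)], 6, k)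
    else (toks ++ [none], mult, k + 1)

-- second pass, inner loop: walk the tokens building one pair; state = (u, v, m)
def pvBuildStep (n : Nat) : (List Int × List Int × Nat) → Option (Int × Int) → (List Int × List Int × Nat)
  | (u, v, m), none =>
      if (n >>> m) % 2 == 1 then (u ++ [1], v ++ [0], m + 1) else (u ++ [0], v ++ [1], m + 1)
  | (u, v, m), some (a, b) => (u ++ [a], v ++ [b], m)

def pvBuild (toks : List (Option (Int × Int))) (n : Nat) : List Int × List Int :=
  ((toks.foldl (pvBuildStep n) ([1], [1], 0)).1, (toks.foldl (pvBuildStep n) ([1], [1], 0)).2.1)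

def get_uv_vectors_alt (seq : List Int) (use_symmetry : Bool) : (List (List Int × List Int)) × Int :=
  ((List.range (2 ^ ((List.range (seq.length - 1)).foldl (pvTokStep seq use_symmetry) ([], 3, 0)).2.2)).map
      (fun n =>
        ((pvBuild ((List.range (seq.length - 1)).foldl (pvTokStep seq use_symmetry) ([], 3, 0)).1 n).1 ++ [0],
         (pvBuild ((List.range (seq.length - 1)).foldl (pvTokStep seq use_symmetry) ([], 3, 0)).1 n).2 ++ [0])),
   ((List.range (seq.length - 1)).foldl (pvTokStep seq use_symmetry) ([], 3, 0)).2.1)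

-- ===== PRECONDITION & SPEC =====
def Spec_get_uv_vectors (seq : List Int) (use_symmetry : Bool) (out : (List (List Int × List Int)) × Int) : Prop := out = get_uv_vectors_alt seq use_symmetry
instance (seq : List Int) (use_symmetry : Bool) (out : (List (List Int × List Int)) × Int) : Decidable (Spec_get_uv_vectors seq use_symmetry out) := by unfold Spec_get_uv_vectors; infer_instance

-- ===== CLAIM (what is proved, stated in full; the proofs are below) =====
def Claim_equal_get_uv_vectors : Prop := ∀ (seq : List Int) (use_symmetry : Bool), Dom_get_uv_vectors seq use_symmetry → Spec_get_uv_vectors seq use_symmetry (get_uv_vectors seq use_symmetry)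

-- ===== LEMMAS AND PROOFS =====

-- number of branch points in a token list
def pvCN (toks : List (Option (Int × Int))) : Nat := toks.countP Option.isNone

-- the family of pairs encoded by a token list
def pvE (toks : List (Option (Int × Int))) : List (List Int × List Int) :=
  (List.range (2 ^ pvCN toks)).map (pvBuild toks)

theorem pvE_nil : pvE [] = [([1], [1])] := by decide

theorem pvCN_cons_some (t : Int × Int) (toks : List (Option (Int × Int))) :
    pvCN (some t :: toks) = pvCN toks := by
  simp [pvCN]

theorem pvCN_cons_none (toks : List (Option (Int × Int))) :
    pvCN (none :: toks) = pvCN toks + 1 := by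
  simp [pvCN]

theorem pvCN_append_some (toks : List (Option (Int × Int))) (a b : Int) :
    pvCN (toks ++ [some (a, b)]) = pvCN toks := by
  simp [pvCN, List.countP_append]

theorem pvCN_append_none (toks : List (Option (Int × Int))) :
    pvCN (toks ++ [none]) = pvCN toks + 1 := by
  simp [pvCN, List.countP_append]

-- m-component of the build fold counts the branch points consumed
theorem pvBuild_m (toks : List (Option (Int × Int))) (n : Nat) :
    ∀ (u v : List Int) (m : Nat),
      (toks.foldl (pvBuildStep n) (u, v, m)).2.2 = m + pvCN toks := by
  induction toks with
  | nil => intro u v m; simp [pvCN]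
  | cons t ts ih =>
    intro u v m
    match t with
    | none =>
      simp only [List.foldl_cons, pvBuildStep]
      rcases h : ((n >>> m) % 2 == 1) with _ | _ <;>
        simp [ih, pvCN] <;> omega
    | some (a, b) =>
      simp only [List.foldl_cons, pvBuildStep]
      simp [ih, pvCN]

-- the build fold only reads bits m, …, m + pvCN toks - 1 of n
theorem pvBuild_congr (toks : List (Option (Int × Int))) :
    ∀ (n n' : Nat) (u v : List Int) (m : Nat),
      (∀ j, m ≤ j → j < m + pvCN toks → (n >>> j) % 2 = (n' >>> j) % 2) →
      toks.foldl (pvBuildStep n) (u, v, m) = toks.foldl (pvBuildStep n') (u, v, m) := by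
  induction toks with
  | nil => intro n n' u v m _; rfl
  | cons t ts ih =>
    intro n n' u v m h
    match t with
    | none =>
      have hc := pvCN_cons_none ts
      simp only [List.foldl_cons, pvBuildStep]
      rw [h m le_rfl (by omega)]
      by_cases hb : ((n' >>> m) % 2 == 1) = true
      · rw [if_pos hb]; exact ih n n' _ _ _ (fun j hj hlt => h j (by omega) (by omega))
      · rw [if_neg hb]; exact ih n n' _ _ _ (fun j hj hlt => h j (by omega) (by omega))
    | some (a, b) =>
      have hc := pvCN_cons_some (a, b) ts
      simp only [List.foldl_cons, pvBuildStep]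
      exact ih n n' _ _ _ (fun j hj hlt => h j hj (by omega))

theorem pvBuild_append_some (toks : List (Option (Int × Int))) (a b : Int) (n : Nat) :
    pvBuild (toks ++ [some (a, b)]) n =
      ((pvBuild toks n).1 ++ [a], (pvBuild toks n).2 ++ [b]) := by
  simp [pvBuild, List.foldl_append, pvBuildStep]

theorem shift_mod_two_of_lt {n j k : Nat} (hn : n < 2 ^ k) (hj : k ≤ j) :
    (n >>> j) % 2 = 0 := by
  have : n >>> j = 0 := by
    simp only [Nat.shiftRight_eq_div_pow]
    exact Nat.div_eq_of_lt (lt_of_lt_of_le hn (Nat.pow_le_pow_right (by norm_num) hj))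
  simp [this]

theorem shift_add_pow {n j k : Nat} (hn : n < 2 ^ k) (hj : j < k) :
    ((2 ^ k + n) >>> j) % 2 = (n >>> j) % 2 := by
  simp only [Nat.shiftRight_eq_div_pow]
  have h1 : 2 ^ k = 2 ^ (k - j) * 2 ^ j := by
    rw [← pow_add]; congr 1; omega
  rw [h1, add_comm, Nat.add_mul_div_right _ _ (pow_pos (by norm_num) j)]
  have h2 : 2 ^ (k - j) % 2 = 0 := by
    have : k - j ≠ 0 := by omega
    rcases Nat.exists_eq_succ_of_ne_zero this with ⟨m, hm⟩
    simp [hm, pow_succ, Nat.mul_mod_left]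
  omega

theorem shift_add_pow_self {n k : Nat} (hn : n < 2 ^ k) :
    ((2 ^ k + n) >>> k) % 2 = 1 := by
  simp only [Nat.shiftRight_eq_div_pow]
  rw [add_comm, Nat.add_div_right _ (pow_pos (by norm_num) k), Nat.div_eq_of_lt hn]

theorem pvBuild_append_none_lo (toks : List (Option (Int × Int))) (n : Nat)
    (hn : n < 2 ^ pvCN toks) :
    pvBuild (toks ++ [none]) n =
      ((pvBuild toks n).1 ++ [0], (pvBuild toks n).2 ++ [1]) := by
  simp only [pvBuild, List.foldl_append, List.foldl_cons, List.foldl_nil]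
  have hm := pvBuild_m toks n [1] [1] 0
  rcases hst : toks.foldl (pvBuildStep n) ([1], [1], 0) with ⟨u, v, m⟩
  rw [hst] at hm
  have hm0 : m = pvCN toks := by simpa using hm
  have hbit : (n >>> m) % 2 = 0 := by
    rw [hm0]; exact shift_mod_two_of_lt hn le_rfl
  simp [pvBuildStep, hbit]

theorem pvBuild_append_none_hi (toks : List (Option (Int × Int))) (n : Nat)
    (hn : n < 2 ^ pvCN toks) :
    pvBuild (toks ++ [none]) (2 ^ pvCN toks + n) =
      ((pvBuild toks n).1 ++ [1], (pvBuild toks n).2 ++ [0]) := by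
  simp only [pvBuild, List.foldl_append, List.foldl_cons, List.foldl_nil]
  have hcongr : toks.foldl (pvBuildStep (2 ^ pvCN toks + n)) ([1], [1], 0)
      = toks.foldl (pvBuildStep n) ([1], [1], 0) := by
    apply pvBuild_congr
    intro j _ hlt
    exact shift_add_pow hn (by omega)
  rw [hcongr]
  have hm := pvBuild_m toks n [1] [1] 0
  rcases hst : toks.foldl (pvBuildStep n) ([1], [1], 0) with ⟨u, v, m⟩
  rw [hst] at hm
  have hm0 : m = pvCN toks := by simpa using hm
  have hbit : ((2 ^ pvCN toks + n) >>> m) % 2 = 1 := by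
    rw [hm0]; exact shift_add_pow_self hn
  simp [pvBuildStep, hbit]

theorem pvE_append_some (toks : List (Option (Int × Int))) (a b : Int) :
    pvE (toks ++ [some (a, b)]) = (pvE toks).map (fun p => (p.1 ++ [a], p.2 ++ [b])) := by
  simp only [pvE, pvCN_append_some, List.map_map]
  exact List.map_congr_left (fun n _ => pvBuild_append_some toks a b n)

theorem pvE_append_none (toks : List (Option (Int × Int))) :
    pvE (toks ++ [none]) =
      (pvE toks).map (fun p => (p.1 ++ [0], p.2 ++ [1])) ++
      (pvE toks).map (fun p => (p.1 ++ [1], p.2 ++ [0])) := by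
  simp only [pvE, pvCN_append_none, List.map_map]
  have hsplit : List.range (2 ^ (pvCN toks + 1)) =
      List.range (2 ^ pvCN toks) ++ (List.range (2 ^ pvCN toks)).map (fun x => 2 ^ pvCN toks + x) := by
    rw [pow_succ, mul_two, List.range_add]
  rw [hsplit, List.map_append, List.map_map]
  congr 1
  · exact List.map_congr_left (fun n hn =>
      pvBuild_append_none_lo toks n (List.mem_range.mp hn))
  · exact List.map_congr_left (fun n hn =>
      pvBuild_append_none_hi toks n (List.mem_range.mp hn))

-- k-component of the token fold always equals pvCN of the token list
theorem tok_k (seq : List Int) (us : Bool) (l : List Nat) :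
    ∀ (toks : List (Option (Int × Int))) (mult : Int),
      (l.foldl (pvTokStep seq us) (toks, mult, pvCN toks)).2.2 =
        pvCN (l.foldl (pvTokStep seq us) (toks, mult, pvCN toks)).1 := by
  induction l with
  | nil => intro toks mult; simp
  | cons i l ih =>
    intro toks mult
    simp only [List.foldl_cons, pvTokStep]
    split_ifs <;>
      [rw [← pvCN_append_some toks 0 0]; rw [← pvCN_append_some toks 1 1];
       rw [← pvCN_append_some toks 0 1]; rw [← pvCN_append_none toks]] <;>
      exact ih _ _

-- main invariant: A's fold state is (pvE toks, mult) over B's token-fold state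
theorem main (seq : List Int) (us : Bool) (l : List Nat) :
    ∀ (toks : List (Option (Int × Int))) (mult : Int),
      (us = true → mult = 3 → pvCN toks = 0) →
      l.foldl (pvAstep seq us) (pvE toks, mult) =
        (pvE (l.foldl (pvTokStep seq us) (toks, mult, pvCN toks)).1,
         (l.foldl (pvTokStep seq us) (toks, mult, pvCN toks)).2.1) := by
  induction l with
  | nil => intro toks mult _; simp
  | cons i l ih =>
    intro toks mult hinv
    simp only [List.foldl_cons, pvAstep, pvTokStep]
    split_ifs with h1 h2 h3
    · rw [← pvE_append_some]
      have h := ih (toks ++ [some (0, 0)]) mult (by rw [pvCN_append_some]; exact hinv)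
      rw [pvCN_append_some] at h
      exact h
    · rw [← pvE_append_some]
      have h := ih (toks ++ [some (1, 1)]) mult (by rw [pvCN_append_some]; exact hinv)
      rw [pvCN_append_some] at h
      exact h
    · -- symmetry branch: res is the singleton pvE toks (pvCN toks = 0)
      have hus : us = true := by
        rcases us with _ | _ <;> simp_all
      have hmult : mult = 3 := by
        have := (Bool.and_eq_true _ _).mp h3
        simpa using this.2
      have h0 : pvCN toks = 0 := hinv hus hmult
      have hsing : pvE toks = [pvBuild toks 0] := by
        simp [pvE, h0]
      have hhead : (match pvE toks with
          | [] => ([] : List (List Int × List Int))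
          | p :: rest => (p.1 ++ [0], p.2 ++ [1]) :: rest)
          = pvE (toks ++ [some (0, 1)]) := by
        rw [hsing, pvE_append_some, hsing]
        simp
      rw [hhead]
      have h := ih (toks ++ [some (0, 1)]) 6
        (by intro _ h6; exact absurd h6 (by norm_num))
      rw [pvCN_append_some] at h
      exact h
    · rw [← pvE_append_none]
      have h := ih (toks ++ [none]) mult
        (by intro hu hm; exfalso; exact h3 (by simp [hu, hm]))
      rw [pvCN_append_none] at h
      exact h

-- ===== VERDICT (by name: the statement is the Claim_ definition above) =====
theorem get_uv_vectors_spec : Claim_equal_get_uv_vectors := by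
  intro seq us _
  unfold Spec_get_uv_vectors get_uv_vectors get_uv_vectors_alt
  have h := main seq us (List.range (seq.length - 1)) [] 3 (by intro _ _; rfl)
  have hk := tok_k seq us (List.range (seq.length - 1)) [] 3
  have h0 : pvCN ([] : List (Option (Int × Int))) = 0 := rfl
  rw [h0] at h hk
  rw [pvE_nil] at h
  rw [h, hk]
  simp [pvE, List.map_map, Function.comp]
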